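-- pv_equiv track=rewrite | github.com/tomazcomz/SigmaZero | go/utils.py | _get_captured_territories
-- ===== SOURCE A (Python) =====
-- def invalid_position(i,j,n):    # helper method that returns True if (i,j) is an invalid position
--     return i < 0 or i >= n or j < 0 or j >= n
--
-- def _get_captured_territories(i,j,board,ct_group,captor,visited):
--     if (i,j) in visited or invalid_position(i,j,len(board)):
--         return ct_group, captor
--     visited.add((i,j))
--     if board[i][j] != 0:    # if this position isn't empty, it checks whose player it belongs to
--         if captor == 0:
--             captor = board[i][j]     # getting the captor of this group, if there isn't one yet
--             if captor == 1:
--                 return ct_group, captor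
--             elif captor == -1:
--                 return ct_group, captor
--         elif board[i][j]!=captor:   # If there's two different captors to the group's positions, then
--             return None,0           # it returns None, because the group has links to both players' pieces, hence there's no group captured by one captor
--         if captor == 1:
--             return ct_group, captor     # this piece is captured by the same captor as every piece in this group checked so far
--         elif captor == -1:
--             return ct_group, captor
--     ct_group.add((i,j))  # if this position is empty, then it is added to the territory group
--     neighbors = [(i-1, j), (i+1, j), (i, j-1), (i, j+1)]   # if (i,j) has the same piece as the original position, its neighbors will be checked
--     for x,y in neighbors:
--         ct_group,captor = _get_captured_territories(x,y,board,ct_group,captor,visited)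
--         if ct_group is None:    # if (i,j) has links to pieces of different players
--             return None,0       #   then, there's no captured group of territories
--     return ct_group, captor     # if there is a captured group, it is returned alongside its captor
-- ===== SOURCE B (Python) =====
-- def invalid_position(i, j, n):
--     return i < 0 or i >= n or j < 0 or j >= n
--
-- # Iterative flood fill with an explicit stack instead of recursion; same visit
-- # order (neighbors pushed reversed so they pop as up, down, left, right) and the
-- # same in-place mutation of `visited`/`ct_group`, aborting at the same cell on a
-- # captor conflict.
-- def _get_captured_territories(i, j, board, ct_group, captor, visited):
--     n = len(board)
--     stack = [(i, j)]
--     while stack: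
--         x, y = stack.pop()
--         if (x, y) in visited or invalid_position(x, y, n):
--             continue
--         visited.add((x, y))
--         v = board[x][y]
--         if v != 0:
--             if captor == 0:
--                 captor = v
--             elif v != captor:
--                 return None, 0
--             if captor == 1 or captor == -1:
--                 continue
--         ct_group.add((x, y))
--         stack.extend(((x, y + 1), (x, y - 1), (x + 1, y), (x - 1, y)))
--     return ct_group, captor
-- ===== Notes on version B (the rewrite author's own statement) =====
-- stated objective: alternative
-- what changed: The recursive four-way flood fill is rewritten as an iterative DFS over an explicit stack (neighbors pushed in reverse so they pop as up, down, left, right), preserving the exact visit order, mutations and early abort on a captor conflict while eliminating recursion (no RecursionError on large regions).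
-- outside the precondition, e.g. on _get_captured_territories(0, 0, [[1], [0, 0]], set(), 0, set()): A returns (set(), 1), B returns (set(), 1)
import Mathlib
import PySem

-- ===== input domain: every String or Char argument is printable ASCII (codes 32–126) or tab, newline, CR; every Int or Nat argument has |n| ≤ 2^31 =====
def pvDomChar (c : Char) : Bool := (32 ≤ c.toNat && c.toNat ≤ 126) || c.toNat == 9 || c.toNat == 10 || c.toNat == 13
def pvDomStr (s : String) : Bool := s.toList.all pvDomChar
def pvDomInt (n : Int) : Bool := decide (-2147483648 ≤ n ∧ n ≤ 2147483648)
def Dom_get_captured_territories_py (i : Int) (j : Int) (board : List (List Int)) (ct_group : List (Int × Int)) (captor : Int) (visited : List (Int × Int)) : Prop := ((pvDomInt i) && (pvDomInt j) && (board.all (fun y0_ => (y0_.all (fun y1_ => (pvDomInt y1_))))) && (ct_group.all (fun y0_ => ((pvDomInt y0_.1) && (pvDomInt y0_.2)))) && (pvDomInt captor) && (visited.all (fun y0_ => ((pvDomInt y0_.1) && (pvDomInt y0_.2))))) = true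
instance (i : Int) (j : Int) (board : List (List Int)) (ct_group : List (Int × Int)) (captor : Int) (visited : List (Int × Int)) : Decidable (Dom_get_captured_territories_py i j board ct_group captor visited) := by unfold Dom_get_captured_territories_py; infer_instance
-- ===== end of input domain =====

-- B rewrites the recursive flood fill as an iterative DFS over an explicit stack (same visit
-- order, same return value); equivalence proved on the RETURN VALUE — both Pythons also mutate
-- `visited`/`ct_group` in place, and they do so identically (not modelled here).

-- ===== PORT A =====

-- shared helper: Python's module-level invalid_position(i, j, n)
def pvInvalid (i j n : Int) : Bool :=
  decide (i < 0) || decide (n ≤ i) || decide (j < 0) || decide (n ≤ j)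

-- board[i][j]; only evaluated when 0 ≤ i,j < len(board). The `.getD 0` totalizes the
-- IndexError Python raises on a too-short row — exactly the inputs Pre_ excludes.
def pvCell (board : List (List Int)) (i j : Int) : Int :=
  (((PySem.List.pyGet? board i).bind fun row => PySem.List.pyGet? row j).getD 0)

-- A's stone logic (the two sequential if-blocks after `visited.add`), as a helper:
-- `.inl r` = the function returns r here; `.inr cap` = fall through to the territory part.
def pvTailA (ct : List (Int × Int)) (vis : List (Int × Int)) (cap : Int) :
    Sum (Option (List (Int × Int)) × Int × List (Int × Int)) Int :=
  if cap = 1 then Sum.inl (some ct, cap, vis)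
  else if cap = -1 then Sum.inl (some ct, cap, vis)
  else Sum.inr cap

def pvStoneA (v cap : Int) (ct : List (Int × Int)) (vis : List (Int × Int)) :
    Sum (Option (List (Int × Int)) × Int × List (Int × Int)) Int :=
  if v ≠ 0 then
    if cap = 0 then
      let cap := v
      if cap = 1 then Sum.inl (some ct, cap, vis)
      else if cap = -1 then Sum.inl (some ct, cap, vis)
      else pvTailA ct vis cap
    else if v ≠ cap then Sum.inl (none, 0, vis)
    else pvTailA ct vis cap
  else Sum.inr cap

-- the recursion, with a fuel guard for totality (fuel = board.length² + 1 at top level is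
-- provably never exhausted: each non-trivial call adds a fresh in-bounds cell to visited);
-- pvForA is the `for x,y in neighbors:` loop threading the mutated state.
mutual
def recA : Nat → Int → Int → List (List Int) → List (Int × Int) → Int → List (Int × Int) →
    Option (List (Int × Int)) × Int × List (Int × Int)
  | 0, _, _, _, _, _, vis => (none, 0, vis)
  | fuel + 1, i, j, board, ct, cap, vis =>
    if decide ((i, j) ∈ vis) || pvInvalid i j (board.length : Int) then (some ct, cap, vis)
    else
      let vis1 := PySem.Set.add vis (i, j)
      match pvStoneA (pvCell board i j) cap ct vis1 with
      | Sum.inl r => r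
      | Sum.inr cap1 =>
        pvForA fuel [(i - 1, j), (i + 1, j), (i, j - 1), (i, j + 1)] board
          (PySem.Set.add ct (i, j)) cap1 vis1
termination_by fuel _ _ _ _ _ _ => (fuel, 0)

def pvForA : Nat → List (Int × Int) → List (List Int) → List (Int × Int) → Int → List (Int × Int) →
    Option (List (Int × Int)) × Int × List (Int × Int)
  | _, [], _, ct, cap, vis => (some ct, cap, vis)
  | fuel, (x, y) :: rest, board, ct, cap, vis =>
    match recA fuel x y board ct cap vis with
    | (none, _, v') => (none, 0, v')
    | (some ct', cap', vis') => pvForA fuel rest board ct' cap' vis'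
termination_by fuel cells _ _ _ _ => (fuel, cells.length + 1)
end

def get_captured_territories_py (i : Int) (j : Int) (board : List (List Int)) (ct_group : List (Int × Int)) (captor : Int) (visited : List (Int × Int)) : (Option (List (Int × Int))) × Int :=
  let r := recA (board.length * board.length + 1) i j board ct_group captor visited
  (r.1, r.2.1)

-- ===== PORT B =====

-- B's stone logic; the three outcomes of Source B's `if v != 0:` block.
inductive PvAct : Type
  | ret : PvAct                -- `return None, 0`
  | cont : Int → PvAct         -- `continue` (with the current captor)
  | push : Int → PvAct         -- fall through: add to ct_group and push neighbors

def pvTailB (cap : Int) : PvAct :=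
  if cap = 1 ∨ cap = -1 then PvAct.cont cap else PvAct.push cap

def pvStoneB (v cap : Int) : PvAct :=
  if v ≠ 0 then
    if cap = 0 then pvTailB v
    else if v ≠ cap then PvAct.ret
    else pvTailB cap
  else PvAct.push cap

-- Source B's while loop; the Lean list head is the Python stack's popping end, so
-- `stack.extend(((x,y+1),(x,y-1),(x+1,y),(x-1,y)))` is consing in pop order.
-- Fuel guard for totality (5·board.length² + 2 at top level is provably enough).
def stackLoopB : Nat → List (List Int) → List (Int × Int) → List (Int × Int) → Int → List (Int × Int) →
    Option (List (Int × Int)) × Int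
  | 0, _, _, _, _, _ => (none, 0)
  | _ + 1, _, [], ct, cap, _ => (some ct, cap)
  | fuel + 1, board, (x, y) :: rest, ct, cap, vis =>
    if decide ((x, y) ∈ vis) || pvInvalid x y (board.length : Int) then
      stackLoopB fuel board rest ct cap vis
    else
      let vis1 := PySem.Set.add vis (x, y)
      match pvStoneB (pvCell board x y) cap with
      | PvAct.ret => (none, 0)
      | PvAct.cont cap1 => stackLoopB fuel board rest ct cap1 vis1
      | PvAct.push cap1 =>
        stackLoopB fuel board ((x - 1, y) :: (x + 1, y) :: (x, y - 1) :: (x, y + 1) :: rest)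
          (PySem.Set.add ct (x, y)) cap1 vis1

def get_captured_territories_py_alt (i : Int) (j : Int) (board : List (List Int)) (ct_group : List (Int × Int)) (captor : Int) (visited : List (Int × Int)) : (Option (List (Int × Int))) × Int :=
  stackLoopB (5 * (board.length * board.length) + 2) board [(i, j)] ct_group captor visited

-- ===== PRECONDITION & SPEC =====
-- Python A raises IndexError when the flood fill reaches board[x][y] on a row shorter than
-- len(board). Pre_ admits every input that returns before indexing (first disjunct) and every
-- board all of whose rows are long enough; it also excludes some ragged-board inputs on which
-- A happens to return because the traversal never reaches a short row (see claim cites).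
def Pre_get_captured_territories_py (i : Int) (j : Int) (board : List (List Int)) (ct_group : List (Int × Int)) (captor : Int) (visited : List (Int × Int)) : Prop :=
  ((i, j) ∈ visited ∨ i < 0 ∨ (board.length : Int) ≤ i ∨ j < 0 ∨ (board.length : Int) ≤ j)
  ∨ (∀ row ∈ board, board.length ≤ row.length)
instance (i : Int) (j : Int) (board : List (List Int)) (ct_group : List (Int × Int)) (captor : Int) (visited : List (Int × Int)) : Decidable (Pre_get_captured_territories_py i j board ct_group captor visited) := by unfold Pre_get_captured_territories_py; infer_instance

def pvWitness_get_captured_territories_py : Int × Int × List (List Int) × (List (Int × Int)) × Int × (List (Int × Int)) :=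
  (0, 0, [[0, 1], [1, 1]], [], 0, [])

def Spec_get_captured_territories_py (i : Int) (j : Int) (board : List (List Int)) (ct_group : List (Int × Int)) (captor : Int) (visited : List (Int × Int)) (out : (Option (List (Int × Int))) × Int) : Prop := out = get_captured_territories_py_alt i j board ct_group captor visited
instance (i : Int) (j : Int) (board : List (List Int)) (ct_group : List (Int × Int)) (captor : Int) (visited : List (Int × Int)) (out : (Option (List (Int × Int))) × Int) : Decidable (Spec_get_captured_territories_py i j board ct_group captor visited out) := by unfold Spec_get_captured_territories_py; infer_instance

-- ===== CLAIM (what is proved, stated in full; the proofs are below) =====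
def Claim_equal_get_captured_territories_py : Prop := ∀ (i : Int) (j : Int) (board : List (List Int)) (ct_group : List (Int × Int)) (captor : Int) (visited : List (Int × Int)), Dom_get_captured_territories_py i j board ct_group captor visited → Pre_get_captured_territories_py i j board ct_group captor visited → Spec_get_captured_territories_py i j board ct_group captor visited (get_captured_territories_py i j board ct_group captor visited)

-- ===== LEMMAS AND PROOFS =====

-- The in-bounds cells of an n×n board, and the measure: number of in-bounds cells not visited.
def pvCells (n : Nat) : List (Int × Int) :=
  (List.range n).flatMap fun a => (List.range n).map fun b => ((a : Int), (b : Int))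

def pvMu (board : List (List Int)) (vis : List (Int × Int)) : Nat :=
  ((pvCells board.length).filter fun p => decide (p ∉ vis)).length

lemma pvCells_length (n : Nat) : (pvCells n).length = n * n := by
  simp [pvCells]

lemma pvMu_le (board : List (List Int)) (vis : List (Int × Int)) :
    pvMu board vis ≤ board.length * board.length := by
  calc pvMu board vis ≤ (pvCells board.length).length := List.length_filter_le _ _
    _ = _ := pvCells_length _

lemma pvMem_cells {n : Nat} {x y : Int} (hx0 : 0 ≤ x) (hxn : x < (n : Int))
    (hy0 : 0 ≤ y) (hyn : y < (n : Int)) : (x, y) ∈ pvCells n := by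
  simp [pvCells]
  exact ⟨⟨x.toNat, by omega, by omega⟩, ⟨y.toNat, by omega, by omega⟩⟩

lemma pvFilter_len_le {α : Type} (l : List α) (p q : α → Bool)
    (h : ∀ a ∈ l, q a = true → p a = true) :
    (l.filter q).length ≤ (l.filter p).length := by
  induction l with
  | nil => simp
  | cons a t ih =>
    have ht := ih (fun b hb => h b (List.mem_cons_of_mem _ hb))
    by_cases hq : q a = true
    · have hp := h a List.mem_cons_self hq
      simp [hq, hp]; omega
    · rw [Bool.not_eq_true] at hq
      by_cases hp : p a = true
      · simp [hq, hp]; omega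
      · rw [Bool.not_eq_true] at hp
        simp [hq, hp]; omega

lemma pvFilter_len_lt {α : Type} (l : List α) (p q : α → Bool)
    (h : ∀ a ∈ l, q a = true → p a = true)
    (a : α) (hal : a ∈ l) (hpa : p a = true) (hqa : ¬ q a = true) :
    (l.filter q).length < (l.filter p).length := by
  induction l with
  | nil => simp at hal
  | cons b t ih =>
    have hle := pvFilter_len_le t p q (fun c hc => h c (List.mem_cons_of_mem _ hc))
    rcases List.mem_cons.mp hal with rfl | hat
    · rw [Bool.not_eq_true] at hqa
      simp [hqa, hpa]; omega
    · have hlt := ih (fun c hc => h c (List.mem_cons_of_mem _ hc)) hat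
      by_cases hqb : q b = true
      · have hpb := h b List.mem_cons_self hqb
        simp [hqb, hpb]; omega
      · rw [Bool.not_eq_true] at hqb
        by_cases hpb : p b = true
        · simp [hqb, hpb]; omega
        · rw [Bool.not_eq_true] at hpb
          simp [hqb, hpb]; omega

lemma pvMu_add_le (board : List (List Int)) (vis : List (Int × Int)) (p : Int × Int) :
    pvMu board (PySem.Set.add vis p) ≤ pvMu board vis := by
  apply pvFilter_len_le
  intro a _ ha
  simp only [decide_eq_true_eq] at *
  intro hav
  exact ha (by simp [PySem.Set.mem_add, hav])

lemma pvMu_add_lt (board : List (List Int)) (vis : List (Int × Int)) {x y : Int}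
    (hx0 : 0 ≤ x) (hxn : x < (board.length : Int)) (hy0 : 0 ≤ y) (hyn : y < (board.length : Int))
    (hnv : (x, y) ∉ vis) :
    pvMu board (PySem.Set.add vis (x, y)) < pvMu board vis := by
  apply pvFilter_len_lt _ _ _ _ (x, y) (pvMem_cells hx0 hxn hy0 hyn)
  · simpa using hnv
  · simp [PySem.Set.mem_add]
  · intro a _ ha
    simp only [decide_eq_true_eq] at *
    intro hav
    exact ha (by simp [PySem.Set.mem_add, hav])

-- decode the guard: both branch conditions are the same Bool; when false we get bounds.
lemma pvGuard_false {x y : Int} {n : Nat} {vis : List (Int × Int)}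
    (h : ¬ (decide ((x, y) ∈ vis) || pvInvalid x y (n : Int)) = true) :
    (x, y) ∉ vis ∧ 0 ≤ x ∧ x < (n : Int) ∧ 0 ≤ y ∧ y < (n : Int) := by
  simp only [pvInvalid, Bool.or_eq_true, decide_eq_true_eq, not_or] at h
  exact ⟨h.1, by omega, by omega, by omega, by omega⟩

-- the three aligned outcomes of the two stone checkers
lemma pvStone_rel (v cap : Int) (ct vis : List (Int × Int)) :
    (pvStoneA v cap ct vis = Sum.inl (none, 0, vis) ∧ pvStoneB v cap = PvAct.ret) ∨
    (∃ c, pvStoneA v cap ct vis = Sum.inl (some ct, c, vis) ∧ pvStoneB v cap = PvAct.cont c) ∨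
    (∃ c, pvStoneA v cap ct vis = Sum.inr c ∧ pvStoneB v cap = PvAct.push c) := by
  unfold pvStoneA pvStoneB pvTailA pvTailB
  by_cases hv : v = 0
  · subst hv; simp
  · by_cases hc0 : cap = 0
    · subst hc0
      by_cases h1 : v = 1
      · subst h1; simp
      · by_cases h2 : v = -1
        · subst h2; simp
        · simp [hv, h1, h2]
    · by_cases hvc : v = cap
      · subst hvc
        by_cases h1 : v = 1
        · subst h1; simp
        · by_cases h2 : v = -1
          · subst h2; simp
          · simp [hv, h1, h2]
      · simp [hv, hc0, hvc]

-- invariant of A's recursion: the visited set only shrinks the measure, and a `None`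
-- result always carries captor 0.
def pvInvA (board : List (List Int)) (vis : List (Int × Int))
    (r : Option (List (Int × Int)) × Int × List (Int × Int)) : Prop :=
  pvMu board r.2.2 ≤ pvMu board vis ∧ (r.1 = none → r.2.1 = 0)

lemma pvRecA_inv (board : List (List Int)) :
    ∀ fuel : Nat,
      (∀ i j ct cap vis, pvInvA board vis (recA fuel i j board ct cap vis)) ∧
      (∀ cells ct cap vis, pvInvA board vis (pvForA fuel cells board ct cap vis)) := by
  intro fuel
  induction fuel with
  | zero =>
    have hrec : ∀ (i j : Int) ct cap vis, pvInvA board vis (recA 0 i j board ct cap vis) := by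
      intro i j ct cap vis
      simp [recA, pvInvA]
    refine ⟨hrec, ?_⟩
    intro cells
    induction cells with
    | nil => intro ct cap vis; simp [pvForA, pvInvA]
    | cons c rest ih =>
      intro ct cap vis
      obtain ⟨x, y⟩ := c
      have h1 := hrec x y ct cap vis
      simp only [pvForA]
      rcases hR : recA 0 x y board ct cap vis with ⟨o, c', v'⟩
      rw [hR] at h1
      cases o with
      | none => simpa [pvInvA] using h1.1
      | some ct' =>
        have h2 := ih ct' c' v'
        exact ⟨le_trans h2.1 h1.1, h2.2⟩
  | succ fuel ih =>
    have hrec : ∀ (i j : Int) ct cap vis, pvInvA board vis (recA (fuel + 1) i j board ct cap vis) := by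
      intro i j ct cap vis
      rw [recA]
      by_cases hg : (decide ((i, j) ∈ vis) || pvInvalid i j (board.length : Int)) = true
      · simp [hg, pvInvA]
      · simp only [hg, Bool.false_eq_true, if_false]
        have hmu1 : pvMu board (PySem.Set.add vis (i, j)) ≤ pvMu board vis :=
          pvMu_add_le board vis (i, j)
        rcases pvStone_rel (pvCell board i j) cap ct (PySem.Set.add vis (i, j)) with
          ⟨hA, _⟩ | ⟨c, hA, _⟩ | ⟨c, hA, _⟩ <;> rw [hA]
        · exact ⟨hmu1, fun _ => rfl⟩
        · exact ⟨hmu1, by simp⟩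
        · have h2 := (ih).2 [(i - 1, j), (i + 1, j), (i, j - 1), (i, j + 1)]
            (PySem.Set.add ct (i, j)) c (PySem.Set.add vis (i, j))
          exact ⟨le_trans h2.1 hmu1, h2.2⟩
    refine ⟨hrec, ?_⟩
    intro cells
    induction cells with
    | nil => intro ct cap vis; simp [pvForA, pvInvA]
    | cons c rest ihc =>
      intro ct cap vis
      obtain ⟨x, y⟩ := c
      have h1 := hrec x y ct cap vis
      simp only [pvForA]
      rcases hR : recA (fuel + 1) x y board ct cap vis with ⟨o, c', v'⟩
      rw [hR] at h1
      cases o with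
      | none => simpa [pvInvA] using h1.1
      | some ct' =>
        have h2 := ihc ct' c' v'
        exact ⟨le_trans h2.1 h1.1, h2.2⟩

-- B's loop computes the same value with any sufficiently large fuel
lemma pvStackStable (board : List (List Int)) :
    ∀ k : Nat, ∀ f g : Nat, ∀ stack ct vis : List (Int × Int), ∀ cap : Int,
      stack.length + 5 * pvMu board vis ≤ k →
      stack.length + 5 * pvMu board vis < f →
      stack.length + 5 * pvMu board vis < g →
      stackLoopB f board stack ct cap vis = stackLoopB g board stack ct cap vis := by
  intro k
  induction k using Nat.strong_induction_on with
  | _ k IH =>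
    intro f g stack ct vis cap hk hf hg
    obtain ⟨f', rfl⟩ : ∃ m, f = m + 1 := ⟨f - 1, by omega⟩
    obtain ⟨g', rfl⟩ : ∃ m, g = m + 1 := ⟨g - 1, by omega⟩
    cases stack with
    | nil => simp [stackLoopB]
    | cons c rest =>
      obtain ⟨x, y⟩ := c
      simp only [stackLoopB]
      have hrl : rest.length + 1 = ((x, y) :: rest).length := by simp
      by_cases hgd : (decide ((x, y) ∈ vis) || pvInvalid x y (board.length : Int)) = true
      · simp only [hgd, if_true]
        exact IH (k - 1) (by omega) f' g' rest ct vis cap (by simp at hk ⊢; omega)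
          (by simp at hf ⊢; omega) (by simp at hg ⊢; omega)
      · simp only [hgd, Bool.false_eq_true, if_false]
        obtain ⟨hnv, hx0, hxn, hy0, hyn⟩ := pvGuard_false hgd
        have hlt : pvMu board (PySem.Set.add vis (x, y)) < pvMu board vis :=
          pvMu_add_lt board vis hx0 hxn hy0 hyn hnv
        rcases hS : pvStoneB (pvCell board x y) cap with _ | cap1 | cap1
        · rfl
        · exact IH (k - 1) (by omega) f' g' rest ct (PySem.Set.add vis (x, y)) cap1
            (by simp at hk ⊢; omega) (by simp at hf ⊢; omega) (by simp at hg ⊢; omega)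
        · exact IH (k - 1) (by omega) f' g'
            ((x - 1, y) :: (x + 1, y) :: (x, y - 1) :: (x, y + 1) :: rest)
            (PySem.Set.add ct (x, y)) (PySem.Set.add vis (x, y)) cap1
            (by simp at hk ⊢; omega) (by simp at hf ⊢; omega) (by simp at hg ⊢; omega)

-- THE BRIDGE: with enough fuel on both sides, B's stack loop started on (x,y)::s equals
-- "run A's recursion on (x,y), then continue the loop on s from the resulting state".
lemma pvBridge (board : List (List Int)) :
    ∀ k : Nat,
      (∀ (x y : Int) (s ct vis : List (Int × Int)) (cap : Int) (fa fb gb : Nat),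
        pvMu board vis ≤ k → pvMu board vis < fa →
        s.length + 1 + 5 * pvMu board vis < fb →
        s.length + 5 * pvMu board ((recA fa x y board ct cap vis).2.2) < gb →
        stackLoopB fb board ((x, y) :: s) ct cap vis =
          (match recA fa x y board ct cap vis with
            | (none, _, _) => (none, 0)
            | (some ct', cap', vis') => stackLoopB gb board s ct' cap' vis')) ∧
      (∀ (cells s ct vis : List (Int × Int)) (cap : Int) (fa fb gb : Nat),
        pvMu board vis ≤ k → pvMu board vis < fa →
        cells.length + s.length + 5 * pvMu board vis < fb →
        s.length + 5 * pvMu board ((pvForA fa cells board ct cap vis).2.2) < gb →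
        stackLoopB fb board (cells ++ s) ct cap vis =
          (match pvForA fa cells board ct cap vis with
            | (none, _, _) => (none, 0)
            | (some ct', cap', vis') => stackLoopB gb board s ct' cap' vis')) := by
  intro k
  induction k using Nat.strong_induction_on with
  | _ k IH =>
    have hP : ∀ (x y : Int) (s ct vis : List (Int × Int)) (cap : Int) (fa fb gb : Nat),
        pvMu board vis ≤ k → pvMu board vis < fa →
        s.length + 1 + 5 * pvMu board vis < fb →
        s.length + 5 * pvMu board ((recA fa x y board ct cap vis).2.2) < gb →
        stackLoopB fb board ((x, y) :: s) ct cap vis =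
          (match recA fa x y board ct cap vis with
            | (none, _, _) => (none, 0)
            | (some ct', cap', vis') => stackLoopB gb board s ct' cap' vis') := by
      intro x y s ct vis cap fa fb gb hk hfa hfb hgb
      obtain ⟨fa', rfl⟩ : ∃ m, fa = m + 1 := ⟨fa - 1, by omega⟩
      obtain ⟨fb', rfl⟩ : ∃ m, fb = m + 1 := ⟨fb - 1, by omega⟩
      rw [recA] at hgb ⊢
      simp only [stackLoopB]
      by_cases hgd : (decide ((x, y) ∈ vis) || pvInvalid x y (board.length : Int)) = true
      · simp only [hgd, if_true] at hgb ⊢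
        exact pvStackStable board (s.length + 5 * pvMu board vis) fb' gb s ct vis cap
          le_rfl (by omega) (by omega)
      · simp only [hgd, Bool.false_eq_true, if_false] at hgb ⊢
        obtain ⟨hnv, hx0, hxn, hy0, hyn⟩ := pvGuard_false hgd
        have hlt : pvMu board (PySem.Set.add vis (x, y)) < pvMu board vis :=
          pvMu_add_lt board vis hx0 hxn hy0 hyn hnv
        rcases pvStone_rel (pvCell board x y) cap ct (PySem.Set.add vis (x, y)) with
          ⟨hA, hB⟩ | ⟨c, hA, hB⟩ | ⟨c, hA, hB⟩
        · -- conflict: both return (none, 0)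
          rw [hA] at hgb ⊢; rw [hB]
        · -- early return / continue
          rw [hA] at hgb ⊢; rw [hB]
          show stackLoopB fb' board s ct c (PySem.Set.add vis (x, y)) =
            stackLoopB gb board s ct c (PySem.Set.add vis (x, y))
          exact pvStackStable board (s.length + 5 * pvMu board (PySem.Set.add vis (x, y)))
            fb' gb s ct (PySem.Set.add vis (x, y)) c le_rfl (by omega) hgb
        · -- push: use the for-loop bridge at the smaller measure
          rw [hA] at hgb ⊢; rw [hB]
          have hmu1 : pvMu board (PySem.Set.add vis (x, y)) < k := by omega
          have hQ := (IH (pvMu board (PySem.Set.add vis (x, y))) hmu1).2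
            [(x - 1, y), (x + 1, y), (x, y - 1), (x, y + 1)] s
            (PySem.Set.add ct (x, y)) (PySem.Set.add vis (x, y)) c fa' fb' gb
            le_rfl (by omega) (by simp; omega) hgb
          simpa using hQ
    refine ⟨hP, ?_⟩
    intro cells
    induction cells with
    | nil =>
      intro s ct vis cap fa fb gb hk hfa hfb hgb
      simp only [pvForA] at hgb ⊢
      simp only [List.nil_append]
      exact pvStackStable board (s.length + 5 * pvMu board vis) fb gb s ct vis cap
        le_rfl (by simp at hfb; omega) (by omega)
    | cons c rest ihc =>
      intro s ct vis cap fa fb gb hk hfa hfb hgb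
      obtain ⟨x, y⟩ := c
      have hinv := (pvRecA_inv board fa).1 x y ct cap vis
      simp only [pvForA] at hgb ⊢
      rcases hR : recA fa x y board ct cap vis with ⟨o, c', v'⟩
      rw [hR] at hinv hgb
      have h1 := hP x y (rest ++ s) ct vis cap fa fb (fb - 1) hk hfa
        (by simp at hfb ⊢; omega) (by rw [hR]; simp at hfb ⊢; unfold pvInvA at hinv; simp at hinv; omega)
      rw [hR] at h1
      cases o with
      | none =>
        simpa using h1
      | some ct1 =>
        have h2 := ihc s ct1 v' c' fa (fb - 1) gb
          (le_trans hinv.1 hk) (lt_of_le_of_lt hinv.1 hfa)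
          (by simp at hfb ⊢; unfold pvInvA at hinv; simp at hinv; omega) hgb
        simpa [h2] using h1

-- ===== VERDICT (by name: the statement is the Claim_ definition above) =====
theorem get_captured_territories_py_spec : Claim_equal_get_captured_territories_py := by
  intro i j board ct cap vis _ _
  unfold Spec_get_captured_territories_py
  unfold get_captured_territories_py get_captured_territories_py_alt
  have hmu : pvMu board vis ≤ board.length * board.length := pvMu_le board vis
  have hinv := (pvRecA_inv board (board.length * board.length + 1)).1 i j ct cap vis
  have h := (pvBridge board (pvMu board vis)).1 i j [] ct vis cap
    (board.length * board.length + 1)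
    (5 * (board.length * board.length) + 2) (5 * (board.length * board.length) + 2)
    le_rfl (by omega) (by simp; omega)
    (by unfold pvInvA at hinv; simp at hinv ⊢; omega)
  rw [h]
  rcases hR : recA (board.length * board.length + 1) i j board ct cap vis with ⟨o, c', v'⟩
  rw [hR] at hinv
  cases o with
  | none =>
    unfold pvInvA at hinv
    simp at hinv
    simp [hinv.2]
  | some ct1 =>
    simp [stackLoopB]
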